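-- pv_equiv track=rewrite | github.com/wave-duality/stack-sort | stack sorting.py | standard_bijec
-- ===== SOURCE A (Python) =====
-- def standard_bijec(p):
--   #standard bijection (Knuth 1973) from 132-av to Dyck
--   res = ""
--   if len(p) == 0:
--     return ""
--   if len(p) == 1:
--     return "10"
--   else:
--     n = p.index(max(p))
--     return "1" + standard_bijec(p[:n]) + "0" + standard_bijec(p[(n+1):])
-- ===== SOURCE B (Python) =====
-- def standard_bijec(p):
--     # One right-to-left pass with a monotonic stack, building the string reversed.
--     stack = []
--     out = []
--     for x in reversed(p):
--         while stack and stack[-1] <= x: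
--             stack.pop()
--             out.append("1")
--         out.append("0")
--         stack.append(x)
--     out.extend("1" * len(stack))
--     return "".join(out)[::-1]
-- ===== Notes on version B (the rewrite author's own statement) =====
-- stated objective: faster
-- what changed: Replaced the O(n^2) divide-and-conquer (rescanning each slice for its max and slicing) by a single right-to-left pass with a monotonic stack that emits the Dyck word reversed.
import Mathlib
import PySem

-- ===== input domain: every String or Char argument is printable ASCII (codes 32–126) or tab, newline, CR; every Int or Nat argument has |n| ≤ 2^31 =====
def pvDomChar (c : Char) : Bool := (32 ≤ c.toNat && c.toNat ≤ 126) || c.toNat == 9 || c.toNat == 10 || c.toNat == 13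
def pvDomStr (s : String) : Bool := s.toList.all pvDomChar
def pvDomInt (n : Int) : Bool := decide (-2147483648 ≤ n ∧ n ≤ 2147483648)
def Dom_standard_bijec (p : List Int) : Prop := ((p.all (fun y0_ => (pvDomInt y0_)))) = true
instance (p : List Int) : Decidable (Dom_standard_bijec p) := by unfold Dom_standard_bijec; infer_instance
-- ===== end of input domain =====

-- B replaces A's O(n^2) divide-and-conquer with one right-to-left monotonic-stack pass (O(n)).

-- ===== PORT A =====
-- literal transliteration of A: recursion splitting at the first occurrence of the maximum
def standard_bijec (p : List Int) : String :=
  if p.length = 0 then ""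
  else if p.length = 1 then "10"
  else
    match PySem.List.max? p (fun y => y) with
    | none => ""      -- unreachable (p nonempty); totalisation guard only
    | some m =>
      match hn : PySem.List.index? p m with
      | none => ""    -- unreachable (max is a member); totalisation guard only
      | some n =>
        "1" ++ standard_bijec (PySem.List.slice p none (some (n : Int))) ++ "0"
            ++ standard_bijec (PySem.List.slice p (some ((n : Int) + 1)) none)
termination_by p.length
decreasing_by
  · obtain ⟨hk, -, -⟩ := PySem.List.getElem_of_index?_eq_some hn
    rw [PySem.List.slice_to_natCast]
    simp; omega
  · obtain ⟨hk, -, -⟩ := PySem.List.getElem_of_index?_eq_some hn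
    have : ((n : Int) + 1) = ((n + 1 : Nat) : Int) := by push_cast; ring
    rw [this, PySem.List.slice_from_natCast]
    simp; omega

-- ===== PORT B =====
-- the inner while loop of Source B: pop stack elements ≤ x, emitting '1' per pop
def pvPop : List Int → List Char → Int → List Int × List Char
  | [], out, _ => ([], out)
  | t :: st, out, x => if t ≤ x then pvPop st (out ++ ['1']) x else (t :: st, out)

-- one iteration of Source B's for loop: pop, emit '0', push x
def pvStep (s : List Int × List Char) (x : Int) : List Int × List Char :=
  (x :: (pvPop s.1 s.2 x).1, (pvPop s.1 s.2 x).2 ++ ['0'])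

def standard_bijec_alt (p : List Int) : String :=
  let r := p.reverse.foldl pvStep ([], [])
  String.ofList ((r.2 ++ List.replicate r.1.length '1').reverse)

-- ===== PRECONDITION & SPEC =====
def Spec_standard_bijec (p : List Int) (out : String) : Prop := out = standard_bijec_alt p
instance (p : List Int) (out : String) : Decidable (Spec_standard_bijec p out) := by unfold Spec_standard_bijec; infer_instance

-- ===== CLAIM (what is proved, stated in full; the proofs are below) =====
def Claim_equal_standard_bijec : Prop := ∀ (p : List Int), Dom_standard_bijec p → Spec_standard_bijec p (standard_bijec p)

-- ===== LEMMAS AND PROOFS =====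


-- Fb p = the characters Source B has accumulated (the answer reversed)
def Fb (p : List Int) : List Char :=
  (p.reverse.foldl pvStep ([], [])).2 ++ List.replicate (p.reverse.foldl pvStep ([], [])).1.length '1'

theorem alt_eq_Fb (p : List Int) : standard_bijec_alt p = String.ofList (Fb p).reverse := rfl

-- the output accumulator is write-only: it factors out of pvPop and of the fold
theorem pvPop_out (st : List Int) (o : List Char) (x : Int) :
    pvPop st o x = ((pvPop st [] x).1, o ++ (pvPop st [] x).2) := by
  induction st generalizing o with
  | nil => simp [pvPop]
  | cons t st ih =>
    by_cases h : t ≤ x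
    · simp [pvPop, h]; rw [ih, ih ['1']]; simp
    · simp [pvPop, h]

theorem foldl_out (l : List Int) (st : List Int) (o : List Char) :
    l.foldl pvStep (st, o) = ((l.foldl pvStep (st, [])).1, o ++ (l.foldl pvStep (st, [])).2) := by
  induction l generalizing st o with
  | nil => simp
  | cons x l ih =>
    simp only [List.foldl_cons]
    rw [show pvStep (st, o) x = (x :: (pvPop st [] x).1, o ++ ((pvPop st [] x).2 ++ ['0'])) by
          simp [pvStep]; rw [pvPop_out]; simp,
        show pvStep (st, ([] : List Char)) x = (x :: (pvPop st [] x).1, (pvPop st [] x).2 ++ ['0']) by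
          simp [pvStep]]
    rw [ih, ih _ ((pvPop st [] x).2 ++ ['0'])]
    simp

-- frame: a stack suffix larger than everything processed is inert
theorem pvPop_frame (st bs : List Int) (o : List Char) (x : Int) (hb : ∀ b ∈ bs, x < b) :
    pvPop (st ++ bs) o x = ((pvPop st o x).1 ++ bs, (pvPop st o x).2) := by
  induction st generalizing o with
  | nil =>
    cases bs with
    | nil => simp [pvPop]
    | cons b bs =>
      have : ¬ b ≤ x := by have := hb b (by simp); omega
      simp [pvPop, this]
  | cons t st ih =>
    by_cases h : t ≤ x
    · simp [pvPop, h, ih]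
    · simp [pvPop, h]

theorem foldl_frame (l : List Int) (st bs : List Int) (o : List Char)
    (hb : ∀ a ∈ l, ∀ b ∈ bs, a < b) :
    l.foldl pvStep (st ++ bs, o) = ((l.foldl pvStep (st, o)).1 ++ bs, (l.foldl pvStep (st, o)).2) := by
  induction l generalizing st o with
  | nil => simp
  | cons x l ih =>
    simp only [List.foldl_cons]
    have hx : ∀ b ∈ bs, x < b := fun b h => hb x (by simp) b h
    rw [show pvStep (st ++ bs, o) x = (((x :: (pvPop st o x).1) ++ bs), (pvPop st o x).2 ++ ['0']) by
          simp [pvStep]; rw [pvPop_frame st bs o x hx]; simp]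
    rw [ih _ _ (fun a ha b h => hb a (by simp [ha]) b h)]
    simp [pvStep]

-- every element of the stack was processed
theorem pvPop_mem (st : List Int) (o : List Char) (x : Int) (a : Int)
    (ha : a ∈ (pvPop st o x).1) : a ∈ st := by
  induction st generalizing o with
  | nil => simp [pvPop] at ha
  | cons t st ih =>
    by_cases h : t ≤ x
    · simp [pvPop, h] at ha; exact List.mem_cons_of_mem _ (ih _ ha)
    · simpa [pvPop, h] using ha

theorem foldl_stack_mem (l : List Int) (st : List Int) (o : List Char) (a : Int)
    (ha : a ∈ (l.foldl pvStep (st, o)).1) : a ∈ st ∨ a ∈ l := by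
  induction l generalizing st o with
  | nil => simp_all
  | cons x l ih =>
    simp only [List.foldl_cons] at ha
    rcases ih _ _ ha with h | h
    · simp only [List.mem_cons] at h
      rcases h with h | h
      · simp [h]
      · exact Or.inl (pvPop_mem _ _ _ _ h)
    · simp [h]
  
-- a dominating x flushes the whole stack
theorem pvPop_flush (st : List Int) (o : List Char) (x : Int) (h : ∀ t ∈ st, t ≤ x) :
    pvPop st o x = ([], o ++ List.replicate st.length '1') := by
  induction st generalizing o with
  | nil => simp [pvPop]
  | cons t st ih =>
    have ht : t ≤ x := h t (by simp)
    rw [pvPop]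
    simp only [ht, if_pos]
    rw [ih _ (fun t ht => h t (by simp [ht]))]
    simp [List.replicate_succ]

-- the key decomposition: Fb (a ++ m :: b) for m dominating
theorem Fb_split (a b : List Int) (m : Int)
    (hlt : ∀ y ∈ a, y < m) (hle : ∀ y ∈ b, y ≤ m) :
    Fb (a ++ m :: b) = Fb b ++ '0' :: Fb a ++ ['1'] := by
  have hmem : ∀ t ∈ (b.reverse.foldl pvStep ([], ([] : List Char))).1, t ≤ m := by
    intro t ht
    rcases foldl_stack_mem _ _ _ _ ht with h | h
    · simp at h
    · exact hle t (by simpa using h)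
  unfold Fb
  rw [List.reverse_append, List.reverse_cons]
  rw [show b.reverse ++ [m] ++ a.reverse = (b.reverse ++ [m]) ++ a.reverse by rfl]
  rw [List.foldl_append, List.foldl_append]
  have hstep : List.foldl pvStep (b.reverse.foldl pvStep ([], [])) [m]
      = ([m], (b.reverse.foldl pvStep ([], [])).2
              ++ List.replicate (b.reverse.foldl pvStep ([], [])).1.length '1' ++ ['0']) := by
    simp only [List.foldl_cons, List.foldl_nil, pvStep,
      pvPop_flush (b.reverse.foldl pvStep ([], [])).1 (b.reverse.foldl pvStep ([], [])).2 m hmem]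
  rw [hstep]
  have hfr := foldl_frame a.reverse [] [m]
      ((b.reverse.foldl pvStep ([], [])).2
        ++ List.replicate (b.reverse.foldl pvStep ([], [])).1.length '1' ++ ['0'])
      (fun y hy c hc => by
        simp at hc; subst hc; exact hlt y (by simpa using hy))
  simp only [List.nil_append] at hfr
  rw [hfr, foldl_out]
  simp [List.replicate_succ']

theorem main_equiv (p : List Int) : standard_bijec p = standard_bijec_alt p := by
  induction hN : p.length using Nat.strong_induction_on generalizing p with
  | _ N ih =>
  rw [standard_bijec]
  by_cases h0 : p.length = 0
  · have hp : p = [] := List.eq_nil_of_length_eq_zero h0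
    subst hp; simp [standard_bijec_alt]
  rw [if_neg h0]
  by_cases h1 : p.length = 1
  · obtain ⟨x, hx⟩ := List.length_eq_one_iff.mp h1
    subst hx
    rw [if_pos h1, alt_eq_Fb]
    simp [Fb, pvStep, pvPop]
  rw [if_neg h1]
  split
  next hm =>
    exact absurd ((PySem.List.max?_eq_none_iff p (fun y => y)).mp hm)
      (by intro h; exact h0 (by simp [h]))
  next m hm =>
  split
  next hn =>
    exact absurd (PySem.List.max?_mem hm) ((PySem.List.index?_eq_none_iff p m).mp hn)
  next n hn =>
  obtain ⟨pre, suf, hps, hlen, hnot⟩ := (PySem.List.index?_eq_some_iff p m n).mp hn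
  have hmax : ∀ y ∈ p, y ≤ m := fun y hy => PySem.List.max?_isMax hm y hy
  have hlt : ∀ y ∈ pre, y < m := by
    intro y hy
    have h1 : y ≤ m := hmax y (by rw [hps]; exact List.mem_append_left _ hy)
    have h2 : y ≠ m := fun he => hnot (he ▸ hy)
    omega
  have hle : ∀ y ∈ suf, y ≤ m := fun y hy =>
    hmax y (by rw [hps]; exact List.mem_append_right _ (List.mem_cons_of_mem _ hy))
  subst hps
  subst hlen
  have hs1 : PySem.List.slice (pre ++ m :: suf) none (some (pre.length : Int)) = pre := by
    rw [PySem.List.slice_to_natCast]; exact List.take_left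
  have hs2 : PySem.List.slice (pre ++ m :: suf) (some ((pre.length : Int) + 1)) none = suf := by
    rw [show ((pre.length : Int) + 1) = ((pre.length + 1 : Nat) : Int) by push_cast; ring,
        PySem.List.slice_from_natCast,
        show pre ++ m :: suf = (pre ++ [m]) ++ suf by simp,
        show pre.length + 1 = (pre ++ [m]).length by simp]
    exact List.drop_left
  rw [hs1, hs2]
  have hlp : pre.length < N := by rw [← hN]; simp
  have hls : suf.length < N := by rw [← hN]; simp; omega
  rw [ih pre.length hlp pre rfl, ih suf.length hls suf rfl]
  rw [alt_eq_Fb, alt_eq_Fb, alt_eq_Fb, Fb_split pre suf m hlt hle]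
  rw [show ("1" : String) = String.ofList ['1'] from rfl,
      show ("0" : String) = String.ofList ['0'] from rfl]
  simp only [List.reverse_append, List.reverse_cons, ← String.ofList_append]
  congr 1


-- ===== VERDICT (by name: the statement is the Claim_ definition above) =====
theorem standard_bijec_spec : Claim_equal_standard_bijec := by
  intro p _
  unfold Spec_standard_bijec
  exact main_equiv p
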